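-- pv_equiv track=rewrite | github.com/llikethat/ComfyUI-SAM3DBody2abc | nodes/foot_tracker.py | _filter_contact_frames
-- ===== SOURCE A (Python) =====
-- from typing import Dict, Any, List, Optional, Tuple
--
-- def _filter_contact_frames(states: List[str], min_frames: int) -> List[str]:
--     """Filter out short contact periods."""
--     result = states.copy()
--     n = len(states)
--
--     # For each unique state, check if it persists long enough
--     i = 0
--     while i < n:
--         state = states[i]
--
--         # Count consecutive frames with this state
--         j = i
--         while j < n and states[j] == state:
--             j += 1
--
--         duration = j - i
--
--         # If too short and not "none", convert to "none"
--         if duration < min_frames and state != "none":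
--             for k in range(i, j):
--                 result[k] = "none"
--
--         i = j
--
--     return result
-- ===== SOURCE B (Python) =====
-- from typing import List
--
-- def _filter_contact_frames(states: List[str], min_frames: int) -> List[str]:
--     """Filter out short contact periods (run-length encode, then expand)."""
--     # Pass 1: run-length encoding, built back-to-front.
--     runs: List[tuple] = []
--     for s in reversed(states):
--         if runs and runs[0][0] == s:
--             runs[0] = (s, runs[0][1] + 1)
--         else:
--             runs.insert(0, (s, 1))
--     # Pass 2: expand the table, shortening non-"none" runs to "none".
--     out: List[str] = []
--     for s, length in runs:
--         if length < min_frames and s != "none":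
--             out.extend(["none"] * length)
--         else:
--             out.extend([s] * length)
--     return out
-- ===== Notes on version B (the rewrite author's own statement) =====
-- stated objective: alternative
-- what changed: Replaced A's index-advancing while-loop with in-place overwrite of a copy by a two-pass decomposition: first a run-length encoding of states, then expansion of that table into a fresh output list.
import Mathlib
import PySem

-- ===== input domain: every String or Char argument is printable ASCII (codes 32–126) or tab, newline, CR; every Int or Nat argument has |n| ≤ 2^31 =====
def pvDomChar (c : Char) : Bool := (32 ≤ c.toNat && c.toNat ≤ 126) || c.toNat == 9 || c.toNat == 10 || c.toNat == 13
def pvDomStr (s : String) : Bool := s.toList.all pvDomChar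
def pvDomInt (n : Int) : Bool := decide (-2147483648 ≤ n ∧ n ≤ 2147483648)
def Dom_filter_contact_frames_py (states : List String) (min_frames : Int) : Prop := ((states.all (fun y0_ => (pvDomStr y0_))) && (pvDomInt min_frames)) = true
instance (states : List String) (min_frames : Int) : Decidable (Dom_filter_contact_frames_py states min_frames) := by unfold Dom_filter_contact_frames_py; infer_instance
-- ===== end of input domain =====

-- B replaces A's single while-loop with in-place overwrite by a two-pass RLE-then-expand decomposition; same cost, no mutation of the input (A only mutates its own copy).

-- ===== PORT A =====
-- A's inner `while j < n and states[j] == state` loop: length of the run of `state` at the front.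
def pvCountRun (state : String) : List String → Nat
  | [] => 0
  | x :: xs => if x == state then 1 + pvCountRun state xs else 0

-- A's outer while-loop: each iteration handles one run [i, j); the overwritten copy
-- equals, run by run, either the original slice or a block of "none".
def pvGoA (min_frames : Int) : List String → List String
  | [] => []
  | s :: rest =>
    let d := 1 + pvCountRun s rest          -- duration = j - i  (the while-count starting at i)
    (if (d : Int) < min_frames ∧ s ≠ "none" then List.replicate d "none"
     else (s :: rest).take d) ++ pvGoA min_frames (rest.drop (pvCountRun s rest))
termination_by l => l.length
decreasing_by simp

def filter_contact_frames_py (states : List String) (min_frames : Int) : List String :=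
  pvGoA min_frames states

-- ===== PORT B =====
-- Pass 1 of Source B: run-length encoding, built back-to-front (iterating reversed(states) = foldr).
def pvRLEstep (s : String) (runs : List (String × Nat)) : List (String × Nat) :=
  match runs with
  | (t, n) :: rest => if t == s then (s, n + 1) :: rest else (s, 1) :: (t, n) :: rest
  | [] => [(s, 1)]

def pvRLE (states : List String) : List (String × Nat) :=
  states.foldr pvRLEstep []

-- Pass 2 of Source B: expand the table.
def pvExpand (min_frames : Int) (runs : List (String × Nat)) : List String :=
  runs.flatMap (fun r =>
    if (r.2 : Int) < min_frames ∧ r.1 ≠ "none" then List.replicate r.2 "none"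
    else List.replicate r.2 r.1)

def filter_contact_frames_py_alt (states : List String) (min_frames : Int) : List String :=
  pvExpand min_frames (pvRLE states)

-- ===== PRECONDITION & SPEC =====
def Spec_filter_contact_frames_py (states : List String) (min_frames : Int) (out : List String) : Prop := out = filter_contact_frames_py_alt states min_frames
instance (states : List String) (min_frames : Int) (out : List String) : Decidable (Spec_filter_contact_frames_py states min_frames out) := by unfold Spec_filter_contact_frames_py; infer_instance

-- ===== CLAIM (what is proved, stated in full; the proofs are below) =====
def Claim_equal_filter_contact_frames_py : Prop := ∀ (states : List String) (min_frames : Int), Dom_filter_contact_frames_py states min_frames → Spec_filter_contact_frames_py states min_frames (filter_contact_frames_py states min_frames)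

-- ===== LEMMAS AND PROOFS =====

-- The RLE of a list starts with its first run.
theorem pvRLE_run (s : String) (l : List String) :
    pvRLE (s :: l) = (s, 1 + pvCountRun s l) :: pvRLE (l.drop (pvCountRun s l)) := by
  induction l generalizing s with
  | nil => simp [pvRLE, pvRLEstep, pvCountRun]
  | cons t ts ih =>
    have hstep : pvRLE (s :: t :: ts) = pvRLEstep s (pvRLE (t :: ts)) := by
      simp [pvRLE]
    rw [hstep, ih t]
    by_cases h : t = s
    · subst h
      simp only [pvRLEstep, beq_self_eq_true, if_true, pvCountRun]
      rw [show 1 + (1 + pvCountRun t ts) = (1 + pvCountRun t ts) + 1 from by omega,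
          show (1 + pvCountRun t ts) = pvCountRun t ts + 1 from by omega]
      simp [List.drop_succ_cons]
    · have hb : (t == s) = false := by simp [h]
      simp only [pvRLEstep, hb, pvCountRun]
      simp [ih t]

-- The first run really is a constant block.
theorem pvTake_run (s : String) (l : List String) :
    (s :: l).take (1 + pvCountRun s l) = List.replicate (1 + pvCountRun s l) s := by
  induction l generalizing s with
  | nil => simp [pvCountRun]
  | cons t ts ih =>
    by_cases h : t = s
    · subst h
      have := ih t
      simp only [pvCountRun, beq_self_eq_true, if_true]
      rw [show 1 + (1 + pvCountRun t ts) = (1 + pvCountRun t ts) + 1 from by omega]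
      simp only [List.take_succ_cons]
      rw [show (1 + pvCountRun t ts) = pvCountRun t ts + 1 from by omega] at this ⊢
      simp only [List.replicate_succ] at this ⊢
      rw [this]
    · simp [pvCountRun, h]

theorem pvGoA_expand (min_frames : Int) (l : List String) :
    pvGoA min_frames l = pvExpand min_frames (pvRLE l) := by
  have key : ∀ (n : Nat) (l : List String), l.length ≤ n →
      pvGoA min_frames l = pvExpand min_frames (pvRLE l) := by
    intro n
    induction n with
    | zero =>
      intro l hl
      have : l = [] := by cases l <;> simp_all
      subst this
      simp [pvGoA.eq_def, pvRLE, pvExpand]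
    | succ n ih =>
      intro l hl
      cases l with
      | nil => simp [pvGoA.eq_def, pvRLE, pvExpand]
      | cons s rest =>
        rw [pvGoA.eq_def]
        dsimp only
        rw [pvRLE_run]
        have hrec := ih (rest.drop (pvCountRun s rest))
          (by simp at hl ⊢; omega)
        rw [hrec]
        simp only [pvExpand, List.flatMap_cons]
        congr 1
        split_ifs with h
        · rfl
        · exact pvTake_run s rest
  exact key l.length l le_rfl

-- ===== VERDICT (by name: the statement is the Claim_ definition above) =====
theorem filter_contact_frames_py_spec : Claim_equal_filter_contact_frames_py := by
  intro states min_frames _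
  unfold Spec_filter_contact_frames_py filter_contact_frames_py filter_contact_frames_py_alt
  exact pvGoA_expand min_frames states
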